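-- pv_equiv track=rewrite | github.com/zhangh05/net_tool | netops/modules/http_handler.py | _build_plan_summary
-- ===== SOURCE A (Python) =====
-- def _build_plan_summary(ops):
--     """根据 ops 列表生成人类可读的 plan 摘要。"""
--     if not ops:
--         return "空 plan"
--     parts = []
--     add_count = sum(1 for o in ops if o.get('action') == 'add')
--     connect_count = sum(1 for o in ops if o.get('action') == 'connect')
--     delete_count = sum(1 for o in ops if o.get('action') == 'delete')
--     if add_count > 0:
--         parts.append(f"添加{add_count}台设备")
--     if connect_count > 0:
--         parts.append(f"建立{connect_count}条连线")
--     if delete_count > 0: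
--         parts.append(f"删除{delete_count}台设备")
--     if not parts:
--         parts.append(f"执行{len(ops)}个操作")
--     return "、".join(parts)
-- ===== SOURCE B (Python) =====
-- def _build_plan_summary(ops):
--     """根据 ops 列表生成人类可读的 plan 摘要。"""
--     if not ops:
--         return "空 plan"
--     a = c = d = 0
--     for o in ops:
--         act = o.get('action')
--         if act == 'add':
--             a += 1
--         elif act == 'connect':
--             c += 1
--         elif act == 'delete':
--             d += 1
--     parts = [f"{verb}{n}{unit}" for n, verb, unit in
--              ((a, "添加", "台设备"), (c, "建立", "条连线"), (d, "删除", "台设备"))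
--              if n > 0]
--     return "、".join(parts) or f"执行{len(ops)}个操作"
-- ===== Notes on version B (the rewrite author's own statement) =====
-- stated objective: alternative
-- what changed: Replaces A's three independent full scans (one generator-sum per action) and the four sequential parts-appending ifs with a single fold accumulating an (add,connect,delete) counter triple, a template-list comprehension that filters-and-formats the three parts, and an 'or' fallback on the joined string.
import Mathlib
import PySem

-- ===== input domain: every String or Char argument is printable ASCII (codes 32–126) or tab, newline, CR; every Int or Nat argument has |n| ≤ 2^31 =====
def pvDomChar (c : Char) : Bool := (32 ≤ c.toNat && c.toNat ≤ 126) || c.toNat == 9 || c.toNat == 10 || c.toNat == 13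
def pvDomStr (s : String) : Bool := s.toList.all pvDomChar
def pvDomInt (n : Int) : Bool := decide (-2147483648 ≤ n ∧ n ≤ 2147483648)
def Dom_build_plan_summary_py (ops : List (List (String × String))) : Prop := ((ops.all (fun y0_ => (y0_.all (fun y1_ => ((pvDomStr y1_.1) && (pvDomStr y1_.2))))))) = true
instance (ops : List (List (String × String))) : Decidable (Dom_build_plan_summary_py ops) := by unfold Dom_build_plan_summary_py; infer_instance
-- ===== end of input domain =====

-- B replaces A's three full scans and sequential part-appending ifs by one fold into a counter
-- triple plus a filtered template list; same output, same cost class (alternative decomposition).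

-- ===== PORT A =====
-- o.get('action'): first-match lookup in the dict (assoc list with unique keys)
def pvActionGet (o : List (String × String)) : Option String :=
  (PySem.Dict.mk o).get? "action"

def build_plan_summary_py (ops : List (List (String × String))) : String :=
  if ops.isEmpty then "空 plan" else
  let add_count : Int := (ops.map (fun o => if pvActionGet o == some "add" then (1 : Int) else 0)).sum
  let connect_count : Int := (ops.map (fun o => if pvActionGet o == some "connect" then (1 : Int) else 0)).sum
  let delete_count : Int := (ops.map (fun o => if pvActionGet o == some "delete" then (1 : Int) else 0)).sum
  let parts : List String := []
  let parts := if add_count > 0 then parts ++ ["添加" ++ PySem.Int.toStr add_count ++ "台设备"] else parts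
  let parts := if connect_count > 0 then parts ++ ["建立" ++ PySem.Int.toStr connect_count ++ "条连线"] else parts
  let parts := if delete_count > 0 then parts ++ ["删除" ++ PySem.Int.toStr delete_count ++ "台设备"] else parts
  let parts := if parts.isEmpty then parts ++ ["执行" ++ PySem.Int.toStr (ops.length : Int) ++ "个操作"] else parts
  PySem.Str.join "、" parts

-- ===== PORT B =====
-- one loop: a/c/d counters bumped by an if/elif chain on o.get('action')
def pvTallyStep (t : Int × Int × Int) (o : List (String × String)) : Int × Int × Int :=
  let act := pvActionGet o
  if act == some "add" then (t.1 + 1, t.2.1, t.2.2)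
  else if act == some "connect" then (t.1, t.2.1 + 1, t.2.2)
  else if act == some "delete" then (t.1, t.2.1, t.2.2 + 1)
  else t

def build_plan_summary_py_alt (ops : List (List (String × String))) : String :=
  if ops.isEmpty then "空 plan" else
  let t := ops.foldl pvTallyStep (0, 0, 0)
  -- [f"{verb}{n}{unit}" for n, verb, unit in templates if n > 0]
  let templates : List (Int × String × String) :=
    [(t.1, "添加", "台设备"), (t.2.1, "建立", "条连线"), (t.2.2, "删除", "台设备")]
  let parts := (templates.filter (fun x => x.1 > 0)).map
    (fun x => x.2.1 ++ PySem.Int.toStr x.1 ++ x.2.2)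
  let j := PySem.Str.join "、" parts
  -- "…".join(parts) or f"…": the empty string is falsy
  if j = "" then "执行" ++ PySem.Int.toStr (ops.length : Int) ++ "个操作" else j

-- ===== PRECONDITION & SPEC =====
def Spec_build_plan_summary_py (ops : List (List (String × String))) (out : String) : Prop := out = build_plan_summary_py_alt ops
instance (ops : List (List (String × String))) (out : String) : Decidable (Spec_build_plan_summary_py ops out) := by unfold Spec_build_plan_summary_py; infer_instance

-- ===== CLAIM (what is proved, stated in full; the proofs are below) =====
def Claim_equal_build_plan_summary_py : Prop := ∀ (ops : List (List (String × String))), Dom_build_plan_summary_py ops → Spec_build_plan_summary_py ops (build_plan_summary_py ops)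

-- ===== LEMMAS AND PROOFS =====

-- B's fold computes exactly A's three 0/1-sums.
theorem pv_fold_tally (ops : List (List (String × String))) (t : Int × Int × Int) :
    ops.foldl pvTallyStep t =
      (t.1 + (ops.map (fun o => if pvActionGet o == some "add" then (1 : Int) else 0)).sum,
       t.2.1 + (ops.map (fun o => if pvActionGet o == some "connect" then (1 : Int) else 0)).sum,
       t.2.2 + (ops.map (fun o => if pvActionGet o == some "delete" then (1 : Int) else 0)).sum) := by
  induction ops generalizing t with
  | nil => simp
  | cons o rest ih =>
    simp only [List.foldl_cons, List.map_cons, List.sum_cons, ih]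
    unfold pvTallyStep
    by_cases h1 : pvActionGet o = some "add"
    · simp [h1, Prod.ext_iff]; omega
    · by_cases h2 : pvActionGet o = some "connect"
      · simp [h2, Prod.ext_iff]; omega
      · by_cases h3 : pvActionGet o = some "delete"
        · simp [h3, Prod.ext_iff]; omega
        · simp [h1, h2, h3]

-- a join whose first part starts with a character is not the empty string
theorem pv_join_ne_empty (sep p : String) (rest : List String) (hp : p.toList ≠ []) :
    PySem.Str.join sep (p :: rest) ≠ "" := by
  intro h
  have := congrArg String.toList h
  cases rest with
  | nil =>
    simp only [PySem.Str.toList_join, List.map_cons, List.map_nil] at this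
    rw [PySem.Chars.join_singleton] at this
    exact hp (by simpa using this)
  | cons q qs =>
    simp only [PySem.Str.toList_join, List.map_cons] at this
    rw [PySem.Chars.join_cons_cons] at this
    cases hl : p.toList with
    | nil => exact hp hl
    | cons c cs => simp [hl] at this

-- ===== VERDICT (by name: the statement is the Claim_ definition above) =====
theorem build_plan_summary_py_spec : Claim_equal_build_plan_summary_py := by
  intro ops _
  unfold Spec_build_plan_summary_py build_plan_summary_py build_plan_summary_py_alt
  by_cases he : ops.isEmpty
  · simp [he]
  · simp only [he, pv_fold_tally, zero_add]
    set cA := (ops.map (fun o => if pvActionGet o == some "add" then (1 : Int) else 0)).sum with hA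
    set cC := (ops.map (fun o => if pvActionGet o == some "connect" then (1 : Int) else 0)).sum with hC
    set cD := (ops.map (fun o => if pvActionGet o == some "delete" then (1 : Int) else 0)).sum with hD
    by_cases h1 : cA > 0 <;> by_cases h2 : cC > 0 <;> by_cases h3 : cD > 0 <;>
      simp only [h1, h2, h3, if_false, List.filter, decide_true, decide_false,
        List.map, List.nil_append, List.cons_append, List.isEmpty_cons, List.isEmpty_nil,
        Bool.false_eq_true, if_pos] <;>
      first
        | (rw [if_neg (pv_join_ne_empty _ _ _ (by simp))])
        | (rw [if_pos (by rfl)]; simp only [PySem.Str.join, PySem.Chars.join_singleton,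
             List.map_cons, List.map_nil]
           rw [← String.toList_inj]
           simp [String.toList_append, PySem.Int.toList_toStr])
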